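-- pv_equiv track=rewrite | github.com/carolinebinley/ml-learning-alignment | alignment/score_quality.py | count_alignments
-- ===== SOURCE A (Python) =====
-- def count_alignments(alignments, expected_alignments):
--     counts = {
--         "expected": 0,
--         "unexpected": 0,
--         "unique": 0,
--         "total": 0,
--     }
--
--     for i, alignment in enumerate(alignments):
--         counts["total"] += 1
--
--         if alignment in expected_alignments:
--             counts["expected"] += 1
--         else:
--             counts["unexpected"] += 1
--
--         if alignment not in alignments[:i]:
--             counts["unique"] += 1
--
--     return counts
-- ===== SOURCE B (Python) =====
-- def count_alignments(alignments, expected_alignments):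
--     expected_set = set(expected_alignments)
--     expected = 0
--     for a in alignments:
--         if a in expected_set:
--             expected += 1
--
--     unique = 0
--     prev = None
--     for a in sorted(alignments):
--         if prev is None or a != prev:
--             unique += 1
--         prev = a
--
--     total = len(alignments)
--     return {
--         "expected": expected,
--         "unexpected": total - expected,
--         "unique": unique,
--         "total": total,
--     }
-- ===== Notes on version B (the rewrite author's own statement) =====
-- stated objective: faster
-- what changed: Instead of one enumerate loop mutating four dict counters with a quadratic alignments[:i] first-occurrence scan, B pre-hashes expected_alignments into a set for the expected pass and counts unique values by sorting alignments and scanning adjacent pairs for run boundaries.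
import Mathlib
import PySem

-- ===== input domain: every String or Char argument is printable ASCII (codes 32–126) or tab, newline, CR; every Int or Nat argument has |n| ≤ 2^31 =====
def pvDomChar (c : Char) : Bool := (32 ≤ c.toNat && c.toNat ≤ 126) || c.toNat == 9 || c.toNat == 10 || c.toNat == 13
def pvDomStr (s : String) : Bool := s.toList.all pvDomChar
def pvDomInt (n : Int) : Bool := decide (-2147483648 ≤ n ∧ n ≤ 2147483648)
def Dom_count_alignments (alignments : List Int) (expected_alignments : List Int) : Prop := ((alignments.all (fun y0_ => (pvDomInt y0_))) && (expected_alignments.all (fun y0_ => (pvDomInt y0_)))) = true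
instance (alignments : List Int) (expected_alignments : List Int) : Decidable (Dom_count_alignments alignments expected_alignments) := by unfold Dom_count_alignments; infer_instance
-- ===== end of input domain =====

-- B replaces A's single counter-mutating loop (with its quadratic alignments[:i] scan) by a
-- hashed-membership pass for "expected" and a sort-then-adjacent-scan for "unique" (objective: faster, measured).

-- ===== PORT A =====
-- the loop body of A's for-statement (i, alignment) over the running dict
def count_alignments_body (alignments : List Int) (expected_alignments : List Int)
    (d : PySem.Dict String Int) (p : Int × Int) : PySem.Dict String Int :=
  let d := d.modify "total" 0 (· + 1)
  let d := if p.2 ∈ expected_alignments then d.modify "expected" 0 (· + 1)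
           else d.modify "unexpected" 0 (· + 1)
  if p.2 ∈ PySem.List.slice alignments none (some p.1) then d
  else d.modify "unique" 0 (· + 1)

def count_alignments (alignments : List Int) (expected_alignments : List Int) : List (String × Int) :=
  let counts : PySem.Dict String Int :=
    ((((PySem.Dict.empty).insert "expected" 0).insert "unexpected" 0).insert "unique" 0).insert "total" 0
  let counts := (PySem.List.enumerate alignments 0).foldl
    (count_alignments_body alignments expected_alignments) counts
  counts.items

-- ===== PORT B =====
def count_alignments_alt (alignments : List Int) (expected_alignments : List Int) : List (String × Int) :=
  let expected_set : PySem.Set Int := PySem.Set.ofList expected_alignments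
  let expected : Int := alignments.foldl
    (fun e a => if PySem.Set.contains expected_set a then e + 1 else e) 0
  let uq : Int × Option Int := (PySem.List.sorted alignments (fun x => x) false).foldl
    (fun s a => ((if s.2 = none ∨ some a ≠ s.2 then s.1 + 1 else s.1), some a))
    ((0 : Int), (none : Option Int))
  let total : Int := alignments.length
  [("expected", expected), ("unexpected", total - expected),
   ("unique", uq.1), ("total", total)]

-- ===== PRECONDITION & SPEC =====
def Spec_count_alignments (alignments : List Int) (expected_alignments : List Int) (out : List (String × Int)) : Prop := out = count_alignments_alt alignments expected_alignments
instance (alignments : List Int) (expected_alignments : List Int) (out : List (String × Int)) : Decidable (Spec_count_alignments alignments expected_alignments out) := by unfold Spec_count_alignments; infer_instance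

-- ===== CLAIM (what is proved, stated in full; the proofs are below) =====
def Claim_equal_count_alignments : Prop := ∀ (alignments : List Int) (expected_alignments : List Int), Dom_count_alignments alignments expected_alignments → Spec_count_alignments alignments expected_alignments (count_alignments alignments expected_alignments)

-- ===== LEMMAS AND PROOFS =====

-- the dict A's loop maintains: always exactly these four keys in this order
def mk4 (e u q t : Int) : PySem.Dict String Int :=
  PySem.Dict.mk [("expected", e), ("unexpected", u), ("unique", q), ("total", t)]

theorem mk4_init :
    ((((PySem.Dict.empty).insert "expected" (0:Int)).insert "unexpected" 0).insert "unique" 0).insert "total" 0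
      = mk4 0 0 0 0 := by decide

theorem body_mk4 (al ex : List Int) (e u q t : Int) (p : Int × Int) :
    count_alignments_body al ex (mk4 e u q t) p =
      mk4 (if p.2 ∈ ex then e + 1 else e) (if p.2 ∈ ex then u else u + 1)
          (if p.2 ∈ PySem.List.slice al none (some p.1) then q else q + 1) (t + 1) := by
  simp only [count_alignments_body, mk4]
  split_ifs <;> rfl

-- number of first occurrences in `suf` relative to the already-seen prefix `pre`
def newq (pre suf : List Int) : Nat :=
  match suf with
  | [] => 0
  | x :: r => (if x ∈ pre then 0 else 1) + newq (pre ++ [x]) r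

theorem mk4_inj (e u q t e' u' q' t' : Int) :
    mk4 e u q t = mk4 e' u' q' t' ↔ (e = e' ∧ u = u' ∧ q = q' ∧ t = t') := by
  simp [mk4]

-- A's expected-count, as a sum over the list
def cntE (ex suf : List Int) : Int :=
  (suf.map (fun a => if a ∈ ex then (1 : Int) else 0)).sum

theorem cntE_cons (ex : List Int) (x : Int) (r : List Int) :
    cntE ex (x :: r) = (if x ∈ ex then (1:Int) else 0) + cntE ex r := by
  simp [cntE]

theorem fold_go (al ex : List Int) : ∀ (suf pre : List Int) (e u q t : Int), al = pre ++ suf →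
    (PySem.List.enumerate suf ((pre.length : Int))).foldl (count_alignments_body al ex) (mk4 e u q t)
      = mk4 (e + cntE ex suf) (u + (suf.length : Int) - cntE ex suf)
            (q + (newq pre suf : Int)) (t + suf.length) := by
  intro suf
  induction suf with
  | nil => intro pre e u q t _; simp [PySem.List.enumerate_nil, cntE, newq]
  | cons x r ih =>
    intro pre e u q t hal
    rw [PySem.List.enumerate_cons, List.foldl_cons, body_mk4]
    have hslice : PySem.List.slice al none (some ((pre.length : Int))) = pre := by
      rw [PySem.List.slice_to_natCast, hal, List.take_left]
    have hlen : ((pre.length : Int)) + 1 = (((pre ++ [x]).length : Int)) := by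
      simp only [List.length_append, List.length_singleton]; push_cast; ring
    rw [hslice, hlen, ih (pre ++ [x]) _ _ _ _ (by simp [hal]), cntE_cons]
    split_ifs with h1 h2 h2 <;>
      rw [mk4_inj] <;>
      simp only [newq, h2, if_true, if_false, List.length_cons] <;>
      push_cast <;>
      and_intros <;> ring

-- the seen-prefix count equals the number of distinct elements added
theorem newq_card : ∀ (l pre : List Int),
    pre.toFinset.card + newq pre l = (pre ++ l).toFinset.card := by
  intro l
  induction l with
  | nil => intro pre; simp [newq]
  | cons x r ih =>
    intro pre
    have h1 : (pre ++ [x]).toFinset = insert x pre.toFinset := by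
      ext y; simp
    by_cases hx : x ∈ pre
    · have hcard : (pre ++ [x]).toFinset.card = pre.toFinset.card := by
        rw [h1, Finset.insert_eq_self.2 (by simp [hx])]
      have := ih (pre ++ [x])
      rw [hcard] at this
      simpa [newq, hx] using this
    · have hcard : (pre ++ [x]).toFinset.card = pre.toFinset.card + 1 := by
        rw [h1, Finset.card_insert_of_notMem (by simp [hx])]
      have := ih (pre ++ [x])
      rw [hcard] at this
      simp only [newq, hx, if_false, List.append_assoc, List.singleton_append] at *
      omega

-- B's run-boundary count over the remaining sorted list, given the previous element
def runsF : Option Int → List Int → Int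
  | _, [] => 0
  | p, x :: r => (if p = none ∨ some x ≠ p then 1 else 0) + runsF (some x) r

theorem fold_runs (g : (Int × Option Int) → Int → (Int × Option Int))
    (hg : g = fun s a => ((if s.2 = none ∨ some a ≠ s.2 then s.1 + 1 else s.1), some a)) :
    ∀ (l : List Int) (u : Int) (p : Option Int), (l.foldl g (u, p)).1 = u + runsF p l := by
  intro l
  induction l with
  | nil => intro u p; simp [runsF]
  | cons x r ih =>
    intro u p
    subst hg
    rw [List.foldl_cons]
    simp only [runsF]
    rw [ih]
    split_ifs <;> ring

theorem runs_sorted_cons : ∀ (r : List Int) (x : Int), (x :: r).Pairwise (· ≤ ·) →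
    1 + runsF (some x) r = (((x :: r).toFinset.card : Int)) := by
  intro r
  induction r with
  | nil => intro x _; simp [runsF]
  | cons y r' ih =>
    intro x hp
    rw [List.pairwise_cons] at hp
    obtain ⟨hx, htail⟩ := hp
    have hxy : x ≤ y := hx y (by simp)
    have hyr : ∀ z ∈ r', y ≤ z := (List.pairwise_cons.1 htail).1
    have hIH := ih y htail
    by_cases hxy' : y = x
    · subst hxy'
      have hset : (y :: y :: r').toFinset = (y :: r').toFinset := by
        ext z; simp
      rw [hset, ← hIH]
      simp [runsF]
    · have hxlt : x < y := lt_of_le_of_ne hxy (Ne.symm hxy')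
      have hxnot : x ∉ (y :: r').toFinset := by
        simp only [List.mem_toFinset, List.mem_cons]
        rintro (h | h)
        · exact (ne_of_lt hxlt) h
        · exact absurd (hyr x h) (not_le.2 hxlt)
      have hcard : ((x :: y :: r').toFinset.card) = (y :: r').toFinset.card + 1 := by
        have hins : (x :: y :: r').toFinset = insert x (y :: r').toFinset := by
          ext z; simp
        rw [hins, Finset.card_insert_of_notMem hxnot]
      have hcond : (some x : Option Int) = none ∨ some y ≠ some x :=
        Or.inr (by simp [hxy'])
      simp only [runsF, if_pos hcond]
      rw [hcard]
      push_cast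
      omega

theorem runs_none (l : List Int) (h : l.Pairwise (· ≤ ·)) :
    runsF none l = ((l.toFinset.card : Int)) := by
  cases l with
  | nil => simp [runsF]
  | cons x r =>
    have := runs_sorted_cons r x h
    simpa [runsF] using this

theorem fold_expected (ex : List Int) : ∀ (l : List Int) (e : Int),
    l.foldl (fun e a => if PySem.Set.contains (PySem.Set.ofList ex) a then e + 1 else e) e
      = e + cntE ex l := by
  intro l
  induction l with
  | nil => intro e; simp [cntE]
  | cons x r ih =>
    intro e
    rw [List.foldl_cons, cntE_cons]
    by_cases hx : x ∈ ex
    · have : PySem.Set.contains (PySem.Set.ofList ex) x = true :=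
        (PySem.Set.contains_iff _ _).2 ((PySem.Set.mem_ofList _ _).2 hx)
      rw [ih]; simp [hx]; ring
    · have : PySem.Set.contains (PySem.Set.ofList ex) x = false := by
        rw [Bool.eq_false_iff]
        intro hc
        exact hx ((PySem.Set.mem_ofList _ _).1 ((PySem.Set.contains_iff _ _).1 hc))
      rw [ih]; simp [hx]

-- ===== VERDICT (by name: the statement is the Claim_ definition above) =====
theorem count_alignments_spec : Claim_equal_count_alignments := by
  intro al ex _
  have hA := fold_go al ex al [] 0 0 0 0 (by simp)
  simp only [List.length_nil, Nat.cast_zero] at hA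
  unfold Spec_count_alignments
  have hperm : (PySem.List.sorted al (fun x => x) false).Perm al := PySem.List.sorted_perm al _ _
  have hfin : (PySem.List.sorted al (fun x => x) false).toFinset = al.toFinset := List.toFinset_eq_of_perm _ _ hperm
  have hpw : (PySem.List.sorted al (fun x => x) false).Pairwise (· ≤ ·) := by
    have := PySem.List.sorted_pairwise al (fun x => x)
    simpa using this
  have hq : newq [] al = al.toFinset.card := by
    have := newq_card al []
    simpa using this
  simp only [count_alignments, count_alignments_alt, mk4_init, hA]
  rw [fold_runs _ rfl, fold_expected, runs_none _ hpw, hfin]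
  simp [mk4, hq, cntE]
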